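-- pv_equiv track=rewrite | github.com/JohnSunny21/python-daily-coding | FreeCodeCamp/CodingQ/LettersNumbers.py | separate_letters_and_numbers
-- ===== SOURCE A (Python) =====
-- def separate_letters_and_numbers(s):
--
--
--     result = []
--     i ,j  = 0, 0
--     while j < len(s):
--
--         while i < len(s) and s[i].isalpha():
--             result.append(s[i])
--             i += 1
--         result.append('-')
--
--         while i < len(s) and s[i].isdigit() :
--             result.append(s[i])
--             i += 1
--         result.append('-')
--
--         j += 1
--
--
--     return "".join(result).strip('-')
-- ===== SOURCE B (Python) =====
-- def separate_letters_and_numbers(s):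
--     # Phase 1: the prefix of s up to (excluding) the first char that is
--     # neither a letter nor a digit (A stalls there and drops the rest).
--     prefix = []
--     for c in s:
--         if not (c.isalpha() or c.isdigit()):
--             break
--         prefix.append(c)
--     # Phase 2: group the prefix into maximal same-class runs, join with '-'.
--     groups, cur = [], ""
--     for c in prefix:
--         if cur and cur[-1].isdigit() == c.isdigit():
--             cur += c
--         else:
--             if cur:
--                 groups.append(cur)
--             cur = c
--     if cur:
--         groups.append(cur)
--     return "-".join(groups)
-- ===== Notes on version B (the rewrite author's own statement) =====
-- stated objective: simpler
-- what changed: A interleaves an alpha-while and a digit-while inside a len(s)-iteration outer loop that emits two dashes every iteration and strips the excess at the end; B is a two-phase decomposition: take the alphanumeric prefix (stopping at the first other character, as A does), then group it into maximal same-class runs and join the runs with a dash separator.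
import Mathlib
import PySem

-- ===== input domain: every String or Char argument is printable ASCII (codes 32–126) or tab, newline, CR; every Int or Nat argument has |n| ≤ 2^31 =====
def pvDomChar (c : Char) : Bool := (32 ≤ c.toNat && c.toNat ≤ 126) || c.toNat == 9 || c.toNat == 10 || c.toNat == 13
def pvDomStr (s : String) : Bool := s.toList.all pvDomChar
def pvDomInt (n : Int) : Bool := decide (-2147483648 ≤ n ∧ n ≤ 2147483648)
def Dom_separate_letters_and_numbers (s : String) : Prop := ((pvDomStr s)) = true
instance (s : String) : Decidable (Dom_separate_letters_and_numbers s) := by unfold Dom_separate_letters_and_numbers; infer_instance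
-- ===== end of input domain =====

-- B replaces A's len(s)-iteration dash-emitting scan (plus final strip) by a two-phase
-- decomposition: take the alphanumeric prefix, group it into same-class runs, join with '-'
-- (objective: simpler).

-- ===== PORT A =====
-- A's outer `while j < len(s)` loop, one fuel unit per j-iteration; the two inner
-- whiles over index i are the take/drop of the current suffix (i only moves forward).
def pvLoopA : Nat → List Char → List Char
  | 0, _ => []
  | f + 1, l =>
    let a := l.takeWhile PySem.Chars.isalpha
    let l1 := l.dropWhile PySem.Chars.isalpha
    let d := l1.takeWhile PySem.Chars.isdigit
    let l2 := l1.dropWhile PySem.Chars.isdigit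
    a ++ '-' :: (d ++ '-' :: pvLoopA f l2)

def separate_letters_and_numbers (s : String) : String :=
  PySem.Str.stripChars (String.ofList (pvLoopA s.toList.length s.toList)) "-"

-- ===== PORT B =====
-- phase 1: the prefix of s before the first char that is neither letter nor digit
def pvPrefix : List Char → List Char
  | [] => []
  | c :: t =>
    if !(PySem.Chars.isalpha c || PySem.Chars.isdigit c) then []
    else c :: pvPrefix t

-- phase 2 loop body: extend cur while the class (isdigit) matches cur's last char
def pvStep (st : List (List Char) × List Char) (c : Char) : List (List Char) × List Char :=
  match st.2.getLast? with
  | some x =>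
    if PySem.Chars.isdigit x == PySem.Chars.isdigit c then (st.1, st.2 ++ [c])
    else (st.1 ++ [st.2], [c])
  | none => (st.1, [c])

def separate_letters_and_numbers_alt (s : String) : String :=
  let pfx := pvPrefix s.toList
  let st := pfx.foldl pvStep ([], [])
  let groups := if st.2 = [] then st.1 else st.1 ++ [st.2]
  String.ofList (PySem.Chars.join ['-'] groups)

-- ===== PRECONDITION & SPEC =====
def Spec_separate_letters_and_numbers (s : String) (out : String) : Prop := out = separate_letters_and_numbers_alt s
instance (s : String) (out : String) : Decidable (Spec_separate_letters_and_numbers s out) := by unfold Spec_separate_letters_and_numbers; infer_instance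

-- ===== CLAIM (what is proved, stated in full; the proofs are below) =====
def Claim_equal_separate_letters_and_numbers : Prop := ∀ (s : String), Dom_separate_letters_and_numbers s → Spec_separate_letters_and_numbers s (separate_letters_and_numbers s)

-- ===== LEMMAS AND PROOFS =====

-- abbreviations for the proofs
def pvPi (c : Char) : Bool := PySem.Chars.isalpha c || PySem.Chars.isdigit c
def pvDash (c : Char) : Bool := ['-'].contains c
def pvLstrip (l : List Char) : List Char := l.dropWhile pvDash
def pvRstrip (l : List Char) : List Char := (l.reverse.dropWhile pvDash).reverse

-- chunking of a list into maximal same-isdigit runs (proof-side characterisation of B)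
def pvChunks : List Char → List (List Char)
  | [] => []
  | c :: t =>
    (c :: t.takeWhile (fun x => PySem.Chars.isdigit x == PySem.Chars.isdigit c)) ::
      pvChunks (t.dropWhile (fun x => PySem.Chars.isdigit x == PySem.Chars.isdigit c))
termination_by l => l.length
decreasing_by
  simpa using Nat.lt_succ_of_le (List.length_dropWhile_le _ _)

def pvT (l : List Char) : List Char := PySem.Chars.join ['-'] (pvChunks (pvPrefix l))

-- character-class facts
theorem pv_alpha_not_digit {c : Char} (h : PySem.Chars.isalpha c = true) :
    PySem.Chars.isdigit c = false := by
  simp only [PySem.Chars.isalpha, PySem.Chars.isupper, PySem.Chars.islower,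
    PySem.Chars.isdigit, Bool.or_eq_true, Bool.and_eq_true, decide_eq_true_eq] at *
  rcases h with ⟨h1, h2⟩ | ⟨h1, h2⟩ <;>
    · simp only [Char.le_def, Bool.and_eq_false_iff, decide_eq_false_iff_not,
        UInt32.le_iff_toNat_le] at *
      have e1 : ('A' : Char).val.toNat = 65 := by decide
      have e2 : ('Z' : Char).val.toNat = 90 := by decide
      have e3 : ('a' : Char).val.toNat = 97 := by decide
      have e4 : ('z' : Char).val.toNat = 122 := by decide
      have e5 : ('0' : Char).val.toNat = 48 := by decide
      have e6 : ('9' : Char).val.toNat = 57 := by decide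
      omega

theorem pv_digit_not_alpha {c : Char} (h : PySem.Chars.isdigit c = true) :
    PySem.Chars.isalpha c = false := by
  by_contra hc
  have := pv_alpha_not_digit (c := c) (by revert hc; cases PySem.Chars.isalpha c <;> simp)
  simp [this] at h

theorem pv_alpha_not_dash {c : Char} (h : PySem.Chars.isalpha c = true) : pvDash c = false := by
  simp only [pvDash, List.contains_cons, List.contains_nil, Bool.or_false, beq_eq_false_iff_ne]
  rintro rfl
  simp [PySem.Chars.isalpha, PySem.Chars.isupper, PySem.Chars.islower] at h

theorem pv_digit_not_dash {c : Char} (h : PySem.Chars.isdigit c = true) : pvDash c = false := by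
  simp only [pvDash, List.contains_cons, List.contains_nil, Bool.or_false, beq_eq_false_iff_ne]
  rintro rfl
  simp [PySem.Chars.isdigit] at h

-- generic takeWhile/dropWhile helpers
theorem pv_tw_app {p : Char → Bool} {u v : List Char} (h : ∀ x ∈ u, p x = true) :
    List.takeWhile p (u ++ v) = u ++ List.takeWhile p v := by
  induction u with
  | nil => simp
  | cons c t ih =>
    have hc := h c (by simp)
    simp [List.takeWhile_cons, hc, ih fun x hx => h x (by simp [hx])]

theorem pv_dw_app {p : Char → Bool} {u v : List Char} (h : ∀ x ∈ u, p x = true) :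
    List.dropWhile p (u ++ v) = List.dropWhile p v := by
  induction u with
  | nil => simp
  | cons c t ih =>
    have hc := h c (by simp)
    simp [List.dropWhile_cons, hc, ih fun x hx => h x (by simp [hx])]

theorem pv_head_dropWhile {p : Char → Bool} {l : List Char} {c : Char} {t : List Char}
    (h : List.dropWhile p l = c :: t) : p c = false := by
  induction l with
  | nil => simp at h
  | cons a r ih =>
    rw [List.dropWhile_cons] at h
    by_cases hp : p a = true
    · exact ih (by simpa [hp] using h)
    · simp [hp] at h
      rcases h with ⟨rfl, rfl⟩
      simpa using hp

theorem pv_nodash_rstrip {l : List Char} (h : ∀ x ∈ l, pvDash x = false) :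
    pvRstrip l = l := by
  unfold pvRstrip
  have hd : List.dropWhile pvDash l.reverse = l.reverse := by
    rw [List.dropWhile_eq_self_iff]
    intro hl
    have hm : l.reverse[0] ∈ l := by
      rw [← List.mem_reverse]
      exact List.getElem_mem hl
    rw [h _ hm]
    simp
  rw [hd, List.reverse_reverse]

theorem pv_rstrip_app (u v : List Char) :
    pvRstrip (u ++ v) = if pvRstrip v = [] then pvRstrip u else u ++ pvRstrip v := by
  unfold pvRstrip
  rw [List.reverse_append]
  by_cases hv : List.dropWhile pvDash v.reverse = []
  · simp [pv_dw_app (fun x hx => (List.dropWhile_eq_nil_iff.mp hv) x hx), hv]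
  · rw [List.dropWhile_append]
    simp only [List.isEmpty_iff, hv, if_neg]
    simp [hv]

theorem pv_rstrip_replicate (k : Nat) : pvRstrip (List.replicate k '-') = [] := by
  unfold pvRstrip
  rw [List.reverse_replicate, List.dropWhile_eq_nil_iff.mpr, List.reverse_nil]
  intro x hx
  simp [List.eq_of_mem_replicate hx, pvDash]

-- pvPrefix = takeWhile pvPi
theorem pvPrefix_eq (l : List Char) : pvPrefix l = l.takeWhile pvPi := by
  induction l with
  | nil => rfl
  | cons c t ih =>
    by_cases h : (PySem.Chars.isalpha c || PySem.Chars.isdigit c) = true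
    · simp [pvPrefix, h, List.takeWhile_cons, pvPi, ih]
    · simp only [Bool.not_eq_true] at h
      simp [pvPrefix, h, List.takeWhile_cons, pvPi]

theorem pvChunks_nil_iff (l : List Char) : pvChunks l = [] ↔ l = [] := by
  cases l with
  | nil => simp [pvChunks]
  | cons c t => simp [pvChunks]

-- A stalled loop only emits dashes
theorem pv_loopA_stall (f : Nat) {l : List Char} (h : pvPrefix l = []) :
    pvLoopA f l = List.replicate (2 * f) '-' := by
  induction f with
  | zero => simp [pvLoopA]
  | succ f ih =>
    have hl : l.takeWhile PySem.Chars.isalpha = [] ∧ l.dropWhile PySem.Chars.isalpha = l ∧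
        l.takeWhile PySem.Chars.isdigit = [] ∧ l.dropWhile PySem.Chars.isdigit = l := by
      cases l with
      | nil => simp
      | cons c t =>
        simp only [pvPrefix] at h
        by_cases hpi : (PySem.Chars.isalpha c || PySem.Chars.isdigit c) = true
        · simp [hpi] at h
        · simp only [Bool.not_eq_true] at hpi
          have hp := Bool.or_eq_false_iff.mp hpi
          simp [List.takeWhile_cons, List.dropWhile_cons, hp.1, hp.2]
    simp only [pvLoopA, hl.1, hl.2.1, hl.2.2.1, hl.2.2.2, List.nil_append]
    rw [ih]
    have : 2 * (f + 1) = (List.replicate (2 * f) '-').length + 1 + 1 := by simp; omega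
    rw [this, List.replicate_succ, List.replicate_succ]
    simp

-- the right-stripped value of A's loop, defined by recursion on the suffix
def pvEmit (l : List Char) : List Char :=
  if h : pvPrefix l = [] then [] else
    let a := l.takeWhile PySem.Chars.isalpha
    let l1 := l.dropWhile PySem.Chars.isalpha
    let d := l1.takeWhile PySem.Chars.isdigit
    let l2 := l1.dropWhile PySem.Chars.isdigit
    if pvEmit l2 = [] then (if d = [] then a else a ++ '-' :: d)
    else a ++ '-' :: (d ++ '-' :: pvEmit l2)
termination_by l.length
decreasing_by
  all_goals
  · cases hl : l with
    | nil => simp [hl, pvPrefix] at h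
    | cons c t =>
      subst hl
      simp only [pvPrefix] at h
      by_cases hpi : (PySem.Chars.isalpha c || PySem.Chars.isdigit c) = true
      case neg => simp [(by simpa using hpi : (PySem.Chars.isalpha c || PySem.Chars.isdigit c) = false)] at h
      case pos =>
        rcases Bool.or_eq_true_iff.mp hpi with ha | hd
        · calc (List.dropWhile PySem.Chars.isdigit (List.dropWhile PySem.Chars.isalpha (c :: t))).length
              ≤ (List.dropWhile PySem.Chars.isalpha (c :: t)).length := List.length_dropWhile_le _ _
            _ ≤ t.length := by rw [List.dropWhile_cons]; simp [ha]; exact List.length_dropWhile_le _ _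
            _ < (c :: t).length := by simp
        · have h1 : List.dropWhile PySem.Chars.isalpha (c :: t) = c :: t := by
            rw [List.dropWhile_cons]; simp [pv_digit_not_alpha hd]
          rw [h1, List.dropWhile_cons]
          simp only [hd, if_pos]
          calc (List.dropWhile PySem.Chars.isdigit t).length ≤ t.length := List.length_dropWhile_le _ _
            _ < (c :: t).length := by simp

-- lemma M1: the right strip of A's loop is pvEmit, for enough fuel
theorem pv_rstrip_loopA : ∀ f l, l.length ≤ f → pvRstrip (pvLoopA f l) = pvEmit l := by
  intro f
  induction f with
  | zero =>
    intro l hl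
    have : l = [] := List.eq_nil_of_length_eq_zero (Nat.le_zero.mp hl)
    subst this
    simp [pvLoopA, pvEmit, pvPrefix, pvRstrip]
  | succ f ih =>
    intro l hl
    by_cases h : pvPrefix l = []
    · rw [pv_loopA_stall _ h, pv_rstrip_replicate, pvEmit]
      simp [h]
    · set a := l.takeWhile PySem.Chars.isalpha with ha
      set l1 := l.dropWhile PySem.Chars.isalpha with hl1
      set d := l1.takeWhile PySem.Chars.isdigit with hd
      set l2 := l1.dropWhile PySem.Chars.isdigit with hl2
      have hlen2 : l2.length ≤ f := by
        cases hc : l with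
        | nil => simp [hc, pvPrefix] at h
        | cons c t =>
          subst hc
          simp only [List.length_cons, Nat.add_le_add_iff_right] at hl
          simp only [pvPrefix] at h
          by_cases hpi : (PySem.Chars.isalpha c || PySem.Chars.isdigit c) = true
          case neg => simp [(by simpa using hpi : (PySem.Chars.isalpha c || PySem.Chars.isdigit c) = false)] at h
          case pos =>
            rcases Bool.or_eq_true_iff.mp hpi with hA | hD
            · have : l2.length ≤ t.length := by
                calc l2.length ≤ l1.length := by rw [hl2]; exact List.length_dropWhile_le _ _
                  _ ≤ t.length := by rw [hl1, List.dropWhile_cons]; simp [hA]; exact List.length_dropWhile_le _ _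
              omega
            · have h1 : l1 = c :: t := by rw [hl1, List.dropWhile_cons]; simp [pv_digit_not_alpha hD]
              have : l2.length ≤ t.length := by
                rw [hl2, h1, List.dropWhile_cons]
                simp only [hD, if_pos]
                exact List.length_dropWhile_le _ _
              omega
      have hR := ih l2 hlen2
      have hand : ∀ x ∈ d, pvDash x = false := fun x hx =>
        pv_digit_not_dash (List.mem_takeWhile_imp hx)
      have hana : ∀ x ∈ a, pvDash x = false := fun x hx =>
        pv_alpha_not_dash (List.mem_takeWhile_imp hx)
      have hstep1 : pvRstrip ('-' :: pvLoopA f l2) =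
          if pvEmit l2 = [] then [] else '-' :: pvEmit l2 := by
        have := pv_rstrip_app ['-'] (pvLoopA f l2)
        rw [hR, List.singleton_append] at this
        rw [this]
        by_cases he : pvEmit l2 = []
        · rw [if_pos he, if_pos he]
          decide
        · rw [if_neg he, if_neg he]
          simp
      have hstep2 : pvRstrip (d ++ '-' :: pvLoopA f l2) =
          if pvEmit l2 = [] then d else d ++ '-' :: pvEmit l2 := by
        rw [pv_rstrip_app, hstep1]
        by_cases he : pvEmit l2 = []
        · simp [he, pv_nodash_rstrip hand]
        · simp [he]
      have hstep3 : pvRstrip ('-' :: (d ++ '-' :: pvLoopA f l2)) =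
          if pvEmit l2 = [] then (if d = [] then [] else '-' :: d)
          else '-' :: (d ++ '-' :: pvEmit l2) := by
        have := pv_rstrip_app ['-'] (d ++ '-' :: pvLoopA f l2)
        rw [hstep2] at this
        rw [List.singleton_append] at this
        rw [this]
        by_cases he : pvEmit l2 = []
        · by_cases hde : d = []
          · simp [he, hde, pvRstrip, pvDash]
          · simp [he, hde, pvRstrip, pvDash]
        · have hne : (d ++ '-' :: pvEmit l2) ≠ [] := by simp
          simp [he, hne]
      have : pvLoopA (f + 1) l = a ++ '-' :: (d ++ '-' :: pvLoopA f l2) := by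
        simp [pvLoopA, ← ha, ← hl1, ← hd, ← hl2]
      rw [this, pv_rstrip_app, hstep3]
      conv_rhs => rw [pvEmit]
      rw [dif_neg h]
      simp only [← ha, ← hl1, ← hd, ← hl2]
      by_cases he : pvEmit l2 = []
      · by_cases hde : d = []
        · simp [he, hde, pv_nodash_rstrip hana]
        · simp [he, hde]
      · have hne : ('-' :: (d ++ '-' :: pvEmit l2)) ≠ [] := by simp
        simp [he, hne]

-- chunk decomposition: a maximal run splits off the first chunk
theorem pv_chunks_run {u v : List Char} {k : Bool} (hu : u ≠ [])
    (hk : ∀ x ∈ u, PySem.Chars.isdigit x = k)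
    (hv : ∀ c t, v = c :: t → PySem.Chars.isdigit c ≠ k) :
    pvChunks (u ++ v) = u :: pvChunks v := by
  cases u with
  | nil => exact absurd rfl hu
  | cons c u' =>
    have hc : PySem.Chars.isdigit c = k := hk c (by simp)
    have hall : ∀ x ∈ u', (PySem.Chars.isdigit x == PySem.Chars.isdigit c) = true := by
      intro x hx
      rw [hc, hk x (by simp [hx])]
      simp
    have hvt : List.takeWhile (fun x => PySem.Chars.isdigit x == PySem.Chars.isdigit c) v = [] := by
      cases v with
      | nil => simp
      | cons b t =>
        rw [List.takeWhile_cons]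
        have := hv b t rfl
        simp only [hc]
        have : (PySem.Chars.isdigit b == k) = false := by
          simpa using this
        simp [this]
    have hvd : List.dropWhile (fun x => PySem.Chars.isdigit x == PySem.Chars.isdigit c) v = v := by
      cases v with
      | nil => simp
      | cons b t =>
        rw [List.dropWhile_cons]
        have := hv b t rfl
        have : (PySem.Chars.isdigit b == k) = false := by simpa using this
        simp [hc, this]
    rw [List.cons_append, pvChunks]
    rw [pv_tw_app hall, pv_dw_app hall, hvt, hvd]
    simp

-- pvT facts
theorem pvT_nil_iff (l : List Char) : pvT l = [] ↔ pvPrefix l = [] := by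
  unfold pvT
  constructor
  · intro h
    by_contra hne
    cases hp : pvPrefix l with
    | nil => exact hne hp
    | cons c t =>
      rw [hp, pvChunks] at h
      cases hcc : pvChunks (List.dropWhile (fun x => PySem.Chars.isdigit x == PySem.Chars.isdigit c) t) with
      | nil => rw [hcc, PySem.Chars.join_singleton] at h; simp at h
      | cons g2 rest2 => rw [hcc, PySem.Chars.join_cons_cons] at h; simp at h
  · intro h
    rw [h]
    simp [pvChunks, PySem.Chars.join_nil]

-- main decomposition of pvEmit: a possible leading dash plus B's joined chunks
theorem pv_emit_eq : ∀ l : List Char,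
    pvEmit l = (match l with
      | c :: _ => if PySem.Chars.isdigit c then ['-'] else []
      | [] => []) ++ pvT l := by
  intro l
  induction hn : l.length using Nat.strong_induction_on generalizing l with
  | _ n ih =>
  by_cases h : pvPrefix l = []
  · rw [pvEmit]
    simp only [h, dite_eq_ite, if_pos]
    rw [(pvT_nil_iff l).mpr h]
    cases l with
    | nil => simp
    | cons c t =>
      simp only [pvPrefix] at h
      by_cases hpi : (PySem.Chars.isalpha c || PySem.Chars.isdigit c) = true
      · simp [hpi] at h
      · simp only [Bool.not_eq_true] at hpi
        simp [(Bool.or_eq_false_iff.mp hpi).2]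
  · cases hc : l with
    | nil => rw [hc] at h; simp [pvPrefix] at h
    | cons c t =>
      subst hc
      simp only [pvPrefix] at h
      by_cases hpi : (PySem.Chars.isalpha c || PySem.Chars.isdigit c) = true
      case neg => simp [(by simpa using hpi : (PySem.Chars.isalpha c || PySem.Chars.isdigit c) = false)] at h
      case pos =>
        set a := (c :: t).takeWhile PySem.Chars.isalpha with ha
        set l1 := (c :: t).dropWhile PySem.Chars.isalpha with hl1
        set d := l1.takeWhile PySem.Chars.isdigit with hd
        set l2 := l1.dropWhile PySem.Chars.isdigit with hl2
        -- general facts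
        have hl2head : ∀ b t', l2 = b :: t' → PySem.Chars.isdigit b = false := by
          intro b t' hb
          exact pv_head_dropWhile (p := PySem.Chars.isdigit) (l := l1) (by rw [← hl2]; exact hb)
        have hpre1 : pvPrefix l1 = d ++ pvPrefix l2 := by
          rw [pvPrefix_eq, pvPrefix_eq]
          have hsplit : l1 = d ++ l2 := by rw [hd, hl2, List.takeWhile_append_dropWhile]
          conv_lhs => rw [hsplit]
          rw [pv_tw_app]
          intro x hx
          have := List.mem_takeWhile_imp hx
          simp [pvPi, this]
        have hchunks2 : ∀ b t', pvPrefix l2 = b :: t' → PySem.Chars.isdigit b ≠ true := by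
          intro b t' hb
          have : l2.takeWhile pvPi = b :: t' := by rw [← pvPrefix_eq, hb]
          cases hl2c : l2 with
          | nil => rw [hl2c] at this; simp at this
          | cons x y =>
            rw [hl2c, List.takeWhile_cons] at this
            by_cases hpx : pvPi x = true
            · simp only [hpx, if_pos, List.cons.injEq] at this
              rw [← this.1]
              simp [hl2head x y hl2c]
            · simp [hpx] at this
        rcases Bool.or_eq_true_iff.mp hpi with hA | hD
        · -- head is a letter: a = c :: …
          have haeq : a = c :: t.takeWhile PySem.Chars.isalpha := by
            rw [ha, List.takeWhile_cons]; simp [hA]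
          have hl1eq : l1 = List.dropWhile PySem.Chars.isalpha t := by
            rw [hl1, List.dropWhile_cons]; simp [hA]
          have hl1head : ∀ b t', l1 = b :: t' → PySem.Chars.isalpha b = false := by
            intro b t' hb
            exact pv_head_dropWhile (p := PySem.Chars.isalpha) (l := t) (by rw [← hl1eq]; exact hb)
          have hdall : ∀ x ∈ d, PySem.Chars.isdigit x = true := fun x hx =>
            List.mem_takeWhile_imp hx
          have haall : ∀ x ∈ a, PySem.Chars.isdigit x = false := fun x hx =>
            pv_alpha_not_digit (List.mem_takeWhile_imp hx)
          have hpre : pvPrefix (c :: t) = a ++ (d ++ pvPrefix l2) := by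
            rw [pvPrefix_eq]
            have hsplit : (c :: t) = a ++ l1 := by rw [ha, hl1, List.takeWhile_append_dropWhile]
            conv_lhs => rw [hsplit]
            rw [pv_tw_app, ← pvPrefix_eq, hpre1]
            intro x hx
            have := List.mem_takeWhile_imp hx
            simp [pvPi, this]
          -- chunk structure
          have hlen2 : l2.length < n := by
            have hn' : t.length + 1 = n := by simpa using hn
            have h1 : l2.length ≤ l1.length := by rw [hl2]; exact List.length_dropWhile_le _ _
            have h2 : l1.length ≤ t.length := by rw [hl1eq]; exact List.length_dropWhile_le _ _
            omega
          have hih := ih l2.length hlen2 l2 rfl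
          have hem2 : pvEmit l2 = pvT l2 := by
            rw [hih]
            cases hl2c : l2 with
            | nil => simp
            | cons b t' => simp [hl2head b t' hl2c]
          by_cases hde : d = []
          · -- no digit run: the rest is stalled
            have hl2e : l2 = l1 := by
              rw [hl2]
              cases hl1c : l1 with
              | nil => simp
              | cons b t' =>
                rw [List.dropWhile_cons]
                have hb : PySem.Chars.isdigit b = false := by
                  by_contra hbb
                  have : PySem.Chars.isdigit b = true := by
                    revert hbb; cases (PySem.Chars.isdigit b) <;> simp
                  rw [hd, hl1c, List.takeWhile_cons] at hde
                  simp [this] at hde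
                simp [hb]
            have hp2 : pvPrefix l2 = [] := by
              rw [pvPrefix_eq]
              cases hl2c : l2 with
              | nil => simp
              | cons b t' =>
                rw [List.takeWhile_cons]
                have hb1 := hl2head b t' hl2c
                have hb2 : PySem.Chars.isalpha b = false := by
                  apply hl1head b t'; rw [← hl2e, hl2c]
                simp [pvPi, hb1, hb2]
            have hem2' : pvEmit l2 = [] := by
              rw [hem2, (pvT_nil_iff l2).mpr hp2]
            have hnp : ¬ pvPrefix (c :: t) = [] := by simp [pvPrefix, hpi]
            have hTl : pvT (c :: t) = a := by
              unfold pvT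
              rw [hpre, hde, hp2]
              simp only [List.nil_append, List.append_nil]
              have hcr := pv_chunks_run (k := false) (u := a) (v := [])
                (by rw [haeq]; simp) haall (by intro b t' hb; simp at hb)
              rw [List.append_nil] at hcr
              rw [hcr]
              simp [pvChunks, PySem.Chars.join_nil, PySem.Chars.join_singleton]
            rw [pvEmit, dif_neg hnp]
            simp only [← ha, ← hl1, ← hd, ← hl2, hem2', hde]
            simp [hTl, pv_alpha_not_digit hA]
          · -- digit run present
            have hTl : pvT (c :: t) = a ++ '-' :: (d ++ (if pvT l2 = [] then [] else '-' :: pvT l2)) := by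
              unfold pvT
              rw [hpre]
              rw [pv_chunks_run (k := false) (by rw [haeq]; simp) haall]
              · rw [pv_chunks_run (k := true) hde hdall hchunks2]
                by_cases hT2 : pvT l2 = []
                · have hp2 : pvPrefix l2 = [] := (pvT_nil_iff l2).mp hT2
                  rw [hp2]
                  simp [pvChunks, PySem.Chars.join_nil, PySem.Chars.join_singleton, PySem.Chars.join_cons_cons]
                · have hp2 : pvPrefix l2 ≠ [] := fun hh => hT2 ((pvT_nil_iff l2).mpr hh)
                  cases hc2 : pvChunks (pvPrefix l2) with
                  | nil => exact absurd ((pvChunks_nil_iff _).mp hc2) hp2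
                  | cons g rest =>
                    have hTv : pvT l2 = PySem.Chars.join ['-'] (g :: rest) := by
                      unfold pvT; rw [hc2]
                    have hT2' : PySem.Chars.join ['-'] (g :: rest) ≠ [] := by
                      rw [← hTv]; exact hT2
                    rw [PySem.Chars.join_cons_cons, PySem.Chars.join_cons_cons]
                    simp [hT2']
              · intro b t' hb
                cases hdc : d with
                | nil => exact absurd hdc hde
                | cons x y =>
                  rw [hdc] at hb
                  simp only [List.cons_append, List.cons.injEq] at hb
                  rw [← hb.1]
                  simp [hdall x (by simp [hdc])]
            rw [pvEmit]
            have hnp : ¬ pvPrefix (c :: t) = [] := by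
              simp [pvPrefix, hpi]
            simp only [← ha, ← hl1, ← hd, ← hl2, dite_eq_ite, if_neg hnp]
            rw [hem2, hTl]
            by_cases hT2 : pvT l2 = []
            · simp [hT2, hde, pv_alpha_not_digit hA]
            · simp [hT2, pv_alpha_not_digit hA]
        · -- head is a digit
          have hl1eq : l1 = c :: t := by
            rw [hl1, List.dropWhile_cons]; simp [pv_digit_not_alpha hD]
          have haeq : a = [] := by
            rw [ha, List.takeWhile_cons]; simp [pv_digit_not_alpha hD]
          have hdeq : d = c :: t.takeWhile PySem.Chars.isdigit := by
            rw [hd, hl1eq, List.takeWhile_cons]; simp [hD]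
          have hde : d ≠ [] := by rw [hdeq]; simp
          have hdall : ∀ x ∈ d, PySem.Chars.isdigit x = true := fun x hx =>
            List.mem_takeWhile_imp hx
          have hpre : pvPrefix (c :: t) = d ++ pvPrefix l2 := by
            rw [← hl1eq, hpre1]
          have hlen2 : l2.length < n := by
            have hn' : t.length + 1 = n := by simpa using hn
            have h1 : l2.length ≤ t.length := by
              rw [hl2, hl1eq, List.dropWhile_cons]
              simp only [hD, if_pos]
              exact List.length_dropWhile_le _ _
            omega
          have hih := ih l2.length hlen2 l2 rfl
          have hem2 : pvEmit l2 = pvT l2 := by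
            rw [hih]
            cases hl2c : l2 with
            | nil => simp
            | cons b t' => simp [hl2head b t' hl2c]
          have hTl : pvT (c :: t) = d ++ (if pvT l2 = [] then [] else '-' :: pvT l2) := by
            unfold pvT
            rw [hpre, pv_chunks_run (k := true) hde hdall hchunks2]
            by_cases hT2 : pvT l2 = []
            · have hp2 : pvPrefix l2 = [] := (pvT_nil_iff l2).mp hT2
              rw [hp2]
              simp [pvChunks, PySem.Chars.join_nil, PySem.Chars.join_singleton]
            · have hp2 : pvPrefix l2 ≠ [] := fun hh => hT2 ((pvT_nil_iff l2).mpr hh)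
              cases hc2 : pvChunks (pvPrefix l2) with
              | nil => exact absurd ((pvChunks_nil_iff _).mp hc2) hp2
              | cons g rest =>
                have hTv : pvT l2 = PySem.Chars.join ['-'] (g :: rest) := by
                  unfold pvT; rw [hc2]
                have hT2' : PySem.Chars.join ['-'] (g :: rest) ≠ [] := by
                  rw [← hTv]; exact hT2
                rw [PySem.Chars.join_cons_cons]
                simp [hT2']
          rw [pvEmit]
          have hnp : ¬ pvPrefix (c :: t) = [] := by
            simp [pvPrefix, hpi]
          simp only [← ha, ← hl1, ← hd, ← hl2, dite_eq_ite, if_neg hnp]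
          rw [hem2, hTl, haeq]
          by_cases hT2 : pvT l2 = []
          · simp [hT2, hde, hD]
          · simp [hT2, hD]

-- B's fold equals the chunk decomposition
theorem pv_fold_run : ∀ (run cur : List Char) (gs : List (List Char)) (k : Bool),
    cur ≠ [] → (∀ x ∈ cur, PySem.Chars.isdigit x = k) → (∀ x ∈ run, PySem.Chars.isdigit x = k) →
    List.foldl pvStep (gs, cur) run = (gs, cur ++ run) := by
  intro run
  induction run with
  | nil => intro cur gs k _ _ _; simp
  | cons c rest ih =>
    intro cur gs k hcur hck hrk
    have hlast : ∃ x, cur.getLast? = some x ∧ PySem.Chars.isdigit x = k := by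
      cases hc : cur.getLast? with
      | none => exact absurd (List.getLast?_eq_none_iff.mp hc) hcur
      | some x =>
        exact ⟨x, rfl, hck x (List.mem_of_getLast? hc)⟩
    rcases hlast with ⟨x, hx, hxk⟩
    have hstep : pvStep (gs, cur) c = (gs, cur ++ [c]) := by
      unfold pvStep
      simp only [hx]
      rw [hxk, hrk c (by simp)]
      simp
    rw [List.foldl_cons, hstep]
    rw [ih (cur ++ [c]) gs k (by simp) ?_ (fun y hy => hrk y (by simp [hy]))]
    · simp
    · intro y hy
      rcases List.mem_append.mp hy with h | h
      · exact hck y h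
      · simp at h; rw [h]; exact hrk c (by simp)

theorem pv_fold_shift : ∀ (xs : List Char) (gs : List (List Char)) (cur : List Char),
    List.foldl pvStep (gs, cur) xs =
      (gs ++ (List.foldl pvStep (([] : List (List Char)), cur) xs).1,
       (List.foldl pvStep (([] : List (List Char)), cur) xs).2) := by
  intro xs
  induction xs with
  | nil => simp
  | cons c rest ih =>
    intro gs cur
    have hstep : ∀ gs', pvStep (gs', cur) c =
        (gs' ++ (pvStep (([] : List (List Char)), cur) c).1, (pvStep (([] : List (List Char)), cur) c).2) := by
      intro gs'
      unfold pvStep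
      cases cur.getLast? with
      | none => simp
      | some x =>
        by_cases hk : (PySem.Chars.isdigit x == PySem.Chars.isdigit c) = true
        · simp [hk]
        · simp [hk]
    rcases hA : pvStep (([] : List (List Char)), cur) c with ⟨g1, c1⟩
    have hstep' : pvStep (gs, cur) c = (gs ++ g1, c1) := by rw [hstep gs, hA]
    rw [List.foldl_cons, List.foldl_cons, hstep', hA, ih (gs ++ g1) c1, ih g1 c1]
    simp

def pvFinal (st : List (List Char) × List Char) : List (List Char) :=
  if st.2 = [] then st.1 else st.1 ++ [st.2]

theorem pv_fold_chunks : ∀ (xs : List Char),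
    pvFinal (List.foldl pvStep ([], []) xs) = pvChunks xs := by
  intro xs
  induction hn : xs.length using Nat.strong_induction_on generalizing xs with
  | _ n ih =>
  cases xs with
  | nil => simp [pvChunks, pvFinal]
  | cons c rest =>
    set run := rest.takeWhile (fun x => PySem.Chars.isdigit x == PySem.Chars.isdigit c) with hrun
    set rest' := rest.dropWhile (fun x => PySem.Chars.isdigit x == PySem.Chars.isdigit c) with hrest'
    have hsplit : rest = run ++ rest' := by rw [hrun, hrest', List.takeWhile_append_dropWhile]
    have hstep0 : pvStep ([], []) c = ([], [c]) := by unfold pvStep; simp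
    have hrunk : ∀ x ∈ run, PySem.Chars.isdigit x = PySem.Chars.isdigit c := by
      intro x hx
      have := List.mem_takeWhile_imp hx
      simpa using this
    have hfr : List.foldl pvStep (([] : List (List Char)), [c]) run = ([], c :: run) := by
      have := pv_fold_run run [c] [] (PySem.Chars.isdigit c) (by simp) (by simp) hrunk
      simpa using this
    rw [List.foldl_cons, hstep0]
    conv_lhs => rw [hsplit]
    rw [List.foldl_append, hfr]
    cases hr : rest' with
    | nil =>
      simp only [List.foldl_nil]
      rw [pvChunks, ← hrun, ← hrest', hr]
      simp [pvFinal, pvChunks]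
    | cons b t =>
      have hb : (PySem.Chars.isdigit b == PySem.Chars.isdigit c) = false :=
        pv_head_dropWhile (p := fun x => PySem.Chars.isdigit x == PySem.Chars.isdigit c) (l := rest) (by rw [← hrest']; exact hr)
      have hstepb : pvStep (([] : List (List Char)), c :: run) b = ([c :: run], [b]) := by
        unfold pvStep
        have hlast := List.getLast?_eq_getLast (l := c :: run) (by simp)
        have hlk : PySem.Chars.isdigit ((c :: run).getLast (by simp)) = PySem.Chars.isdigit c := by
          have hmem := List.getLast_mem (l := c :: run) (by simp)
          rcases List.mem_cons.mp hmem with h | h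
          · rw [h]
          · exact hrunk _ h
        have hb' : (PySem.Chars.isdigit ((c :: run).getLast (by simp)) == PySem.Chars.isdigit b) = false := by
          rw [hlk]
          revert hb
          cases PySem.Chars.isdigit c <;> cases PySem.Chars.isdigit b <;> simp
        simp only [hlast, hb']
        simp
      rw [List.foldl_cons, hstepb]
      have hlen : t.length + 1 < n := by
        have h1 : rest'.length ≤ rest.length := by rw [hrest']; exact List.length_dropWhile_le _ _
        rw [hr] at h1
        simp at h1 hn
        omega
      have hih := ih (b :: t).length (by simpa using hlen) (b :: t) rfl
      have hb2 : List.foldl pvStep (([] : List (List Char)), ([] : List Char)) (b :: t) =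
          List.foldl pvStep ([], [b]) t := by
        rw [List.foldl_cons]
        have hs : pvStep (([] : List (List Char)), ([] : List Char)) b = ([], [b]) := by
          unfold pvStep; simp
        rw [hs]
      rw [pv_fold_shift t [c :: run] [b]]
      rw [pvChunks, ← hrun, ← hrest', hr]
      rw [← hih, hb2, pvFinal, pvFinal]
      by_cases he : (List.foldl pvStep ([], [b]) t).2 = []
      · simp [he]
      · simp [he]

-- the main list-level equivalence
theorem pv_main (l : List Char) :
    PySem.Chars.stripChars (pvLoopA l.length l) ['-'] = pvT l := by
  have hstrip : PySem.Chars.stripChars (pvLoopA l.length l) ['-'] =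
      pvRstrip (pvLstrip (pvLoopA l.length l)) := rfl
  rw [hstrip]
  by_cases h : pvPrefix l = []
  · rw [pv_loopA_stall _ h]
    have h1 : pvLstrip (List.replicate (2 * l.length) '-') = [] := by
      unfold pvLstrip
      rw [List.dropWhile_eq_nil_iff.mpr]
      intro x hx
      simp [List.eq_of_mem_replicate hx, pvDash]
    rw [h1, (pvT_nil_iff l).mpr h]
    simp [pvRstrip]
  · cases hc : l with
    | nil => rw [hc] at h; simp [pvPrefix] at h
    | cons c t =>
      subst hc
      simp only [pvPrefix] at h
      by_cases hpi : (PySem.Chars.isalpha c || PySem.Chars.isdigit c) = true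
      case neg => simp [(by simpa using hpi : (PySem.Chars.isalpha c || PySem.Chars.isdigit c) = false)] at h
      case pos =>
        rcases Bool.or_eq_true_iff.mp hpi with hA | hD
        · -- head alpha: no leading dash at all
          have hX : ∃ r, pvLoopA (c :: t).length (c :: t) = c :: r := by
            cases hf : (c :: t).length with
            | zero => simp at hf
            | succ f =>
              refine ⟨?_, ?_⟩
              · exact (t.takeWhile PySem.Chars.isalpha) ++ '-' ::
                  (((c :: t).dropWhile PySem.Chars.isalpha).takeWhile PySem.Chars.isdigit ++ '-' ::
                    pvLoopA f (((c :: t).dropWhile PySem.Chars.isalpha).dropWhile PySem.Chars.isdigit))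
              · rw [pvLoopA]
                have : (c :: t).takeWhile PySem.Chars.isalpha = c :: t.takeWhile PySem.Chars.isalpha := by
                  rw [List.takeWhile_cons]; simp [hA]
                rw [this]
                simp
          rcases hX with ⟨r, hX⟩
          have hls : pvLstrip (pvLoopA (c :: t).length (c :: t)) = pvLoopA (c :: t).length (c :: t) := by
            rw [hX]
            unfold pvLstrip
            rw [List.dropWhile_cons]
            simp [pv_alpha_not_dash hA]
          rw [hls, pv_rstrip_loopA _ _ (le_refl _), pv_emit_eq]
          simp [pv_alpha_not_digit hA]
        · -- head digit: one leading dash is stripped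
          set l2 := (c :: t).dropWhile PySem.Chars.isdigit with hl2
          have hl1eq : (c :: t).dropWhile PySem.Chars.isalpha = c :: t := by
            rw [List.dropWhile_cons]; simp [pv_digit_not_alpha hD]
          have haeq : (c :: t).takeWhile PySem.Chars.isalpha = [] := by
            rw [List.takeWhile_cons]; simp [pv_digit_not_alpha hD]
          set d := (c :: t).takeWhile PySem.Chars.isdigit with hd
          have hdeq : d = c :: t.takeWhile PySem.Chars.isdigit := by
            rw [hd, List.takeWhile_cons]; simp [hD]
          have hX : pvLoopA (c :: t).length (c :: t) = '-' :: (d ++ '-' :: pvLoopA t.length l2) := by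
            have hf : (c :: t).length = t.length + 1 := by simp
            rw [hf, pvLoopA, haeq, hl1eq, ← hd, ← hl2]
            simp
          have hlen2 : l2.length ≤ t.length := by
            rw [hl2, List.dropWhile_cons]
            simp only [hD, if_pos]
            exact List.length_dropWhile_le _ _
          have hR : pvRstrip (pvLoopA t.length l2) = pvT l2 := by
            rw [pv_rstrip_loopA _ _ hlen2, pv_emit_eq]
            cases hl2c : l2 with
            | nil => simp
            | cons b t' =>
              have hb : PySem.Chars.isdigit b = false := pv_head_dropWhile (p := PySem.Chars.isdigit) (l := c :: t) (by rw [← hl2]; exact hl2c)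
              simp [hb]
          have hls : pvLstrip (pvLoopA (c :: t).length (c :: t)) = d ++ '-' :: pvLoopA t.length l2 := by
            rw [hX]
            unfold pvLstrip
            have h1 : List.dropWhile pvDash ('-' :: (d ++ '-' :: pvLoopA t.length l2)) =
                List.dropWhile pvDash (d ++ '-' :: pvLoopA t.length l2) := by
              rw [List.dropWhile_cons]
              simp [pvDash]
            rw [h1, hdeq, List.cons_append, List.dropWhile_cons, pv_digit_not_dash hD]
            simp
          rw [hls]
          have hand : ∀ x ∈ d, pvDash x = false := fun x hx =>
            pv_digit_not_dash (List.mem_takeWhile_imp hx)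
          have hs1 : pvRstrip ('-' :: pvLoopA t.length l2) =
              if pvT l2 = [] then [] else '-' :: pvT l2 := by
            have := pv_rstrip_app ['-'] (pvLoopA t.length l2)
            rw [hR, List.singleton_append] at this
            rw [this]
            by_cases he : pvT l2 = []
            · simp [he, pvRstrip, pvDash]
            · simp [he]
          rw [pv_rstrip_app, hs1]
          -- compute pvT (c :: t)
          have hchunks2 : ∀ b t', pvPrefix l2 = b :: t' → PySem.Chars.isdigit b ≠ true := by
            intro b t' hb
            have : l2.takeWhile pvPi = b :: t' := by rw [← pvPrefix_eq, hb]
            cases hl2c : l2 with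
            | nil => rw [hl2c] at this; simp at this
            | cons x y =>
              rw [hl2c, List.takeWhile_cons] at this
              by_cases hpx : pvPi x = true
              · simp only [hpx, if_pos, List.cons.injEq] at this
                rw [← this.1]
                simp [pv_head_dropWhile (p := PySem.Chars.isdigit) (l := c :: t) (by rw [← hl2]; exact hl2c : List.dropWhile PySem.Chars.isdigit (c :: t) = x :: y)]
              · simp [hpx] at this
          have hdall : ∀ x ∈ d, PySem.Chars.isdigit x = true := fun x hx =>
            List.mem_takeWhile_imp hx
          have hpre : pvPrefix (c :: t) = d ++ pvPrefix l2 := by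
            rw [pvPrefix_eq, pvPrefix_eq]
            have hsplit : (c :: t) = d ++ l2 := by rw [hd, hl2, List.takeWhile_append_dropWhile]
            conv_lhs => rw [hsplit]
            rw [pv_tw_app]
            intro x hx
            have := List.mem_takeWhile_imp hx
            simp [pvPi, this]
          have hTl : pvT (c :: t) = d ++ (if pvT l2 = [] then [] else '-' :: pvT l2) := by
            unfold pvT
            rw [hpre, pv_chunks_run (k := true) (by rw [hdeq]; simp) hdall hchunks2]
            by_cases hT2 : pvT l2 = []
            · have hp2 : pvPrefix l2 = [] := (pvT_nil_iff l2).mp hT2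
              rw [hp2]
              simp [pvChunks, PySem.Chars.join_nil, PySem.Chars.join_singleton]
            · have hp2 : pvPrefix l2 ≠ [] := fun hh => hT2 ((pvT_nil_iff l2).mpr hh)
              cases hc2 : pvChunks (pvPrefix l2) with
              | nil => exact absurd ((pvChunks_nil_iff _).mp hc2) hp2
              | cons g rest =>
                have hTv : pvT l2 = PySem.Chars.join ['-'] (g :: rest) := by
                  unfold pvT; rw [hc2]
                have hT2' : PySem.Chars.join ['-'] (g :: rest) ≠ [] := by
                  rw [← hTv]; exact hT2
                rw [PySem.Chars.join_cons_cons]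
                simp [hT2']
          rw [hTl]
          by_cases he : pvT l2 = []
          · simp [he, pv_nodash_rstrip hand]
          · simp [he]

-- ===== VERDICT (by name: the statement is the Claim_ definition above) =====
theorem separate_letters_and_numbers_spec : Claim_equal_separate_letters_and_numbers := by
  intro s _
  unfold Spec_separate_letters_and_numbers separate_letters_and_numbers separate_letters_and_numbers_alt
  have hG := pv_fold_chunks (pvPrefix s.toList)
  unfold pvFinal at hG
  rw [PySem.Str.stripChars]
  have hlist : PySem.Chars.stripChars (String.ofList (pvLoopA s.toList.length s.toList)).toList
      "-".toList = pvT s.toList := by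
    rw [String.toList_ofList]
    exact pv_main s.toList
  rw [hlist]
  unfold pvT
  rw [← hG]
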